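-- pv_equiv track=rewrite | github.com/suic86/adventofcode | 2015/day_03/solution.py | houses
-- ===== SOURCE A (Python) =====
-- def houses(moves):
--     xs = {">": 1, "<": -1, "^": 0, "v": 0}
--     ys = {">": 0, "<": 0, "^": 1, "v": -1}
--     x = y = 0
--     yield x, y
--     for move in moves:
--         x += xs[move]
--         y += ys[move]
--         yield x, y
-- ===== SOURCE B (Python) =====
-- def houses(moves):
--     # Two independent per-axis prefix-sum passes, then zip the coordinate lists.
--     xs = _prefix_sums([{">": 1, "<": -1, "^": 0, "v": 0}[m] for m in moves])
--     ys = _prefix_sums([{">": 0, "<": 0, "^": 1, "v": -1}[m] for m in moves])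
--     return list(zip(xs, ys))
--
-- def _prefix_sums(deltas):
--     out = [0]
--     for d in deltas:
--         out.append(out[-1] + d)
--     return out
-- ===== Notes on version B (the rewrite author's own statement) =====
-- stated objective: alternative
-- what changed: Replaces A's single stateful scan that yields positions one by one with a staged computation: build each axis's delta list, take its prefix sums independently, and zip the two coordinate lists into positions; return value only (B returns a list where A returns a generator; identical when iterated).
import Mathlib
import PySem

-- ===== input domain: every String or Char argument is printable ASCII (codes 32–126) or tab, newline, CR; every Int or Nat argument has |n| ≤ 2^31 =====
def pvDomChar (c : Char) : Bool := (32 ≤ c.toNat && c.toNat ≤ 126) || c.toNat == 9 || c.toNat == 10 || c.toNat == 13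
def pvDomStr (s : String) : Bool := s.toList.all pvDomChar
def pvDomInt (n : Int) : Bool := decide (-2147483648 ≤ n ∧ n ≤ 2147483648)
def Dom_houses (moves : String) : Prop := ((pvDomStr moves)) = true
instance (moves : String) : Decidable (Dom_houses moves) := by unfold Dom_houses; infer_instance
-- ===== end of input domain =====

-- B replaces A's single stateful scan with staged passes: per-axis delta lists, independent
-- prefix sums, then a zip of the two coordinate lists; return value only (B returns a list
-- where A returns a generator; identical when iterated).

-- ===== PORT A =====
-- xs[move] / ys[move] raise KeyError on any char that is not one of the four move
-- characters; such inputs are excluded by Pre_houses, so getD's default is never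
-- reached on admitted inputs.
def houses (moves : String) : List (Int × Int) :=
  let xs : PySem.Dict Char Int := PySem.Dict.mk [('>', 1), ('<', -1), ('^', 0), ('v', 0)]
  let ys : PySem.Dict Char Int := PySem.Dict.mk [('>', 0), ('<', 0), ('^', 1), ('v', -1)]
  (moves.toList.foldl
    (fun st move =>
      let x := st.1 + xs.getD move 0
      let y := st.2.1 + ys.getD move 0
      (x, y, st.2.2 ++ [(x, y)]))
    ((0 : Int), (0 : Int), [((0 : Int), (0 : Int))])).2.2

-- ===== PORT B =====
def prefixSums (deltas : List Int) : List Int :=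
  deltas.foldl (fun out d => out ++ [out.getLast! + d]) [0]

def houses_alt (moves : String) : List (Int × Int) :=
  let xs := prefixSums (moves.toList.map
    (fun m => (PySem.Dict.mk [('>', (1:Int)), ('<', -1), ('^', 0), ('v', 0)]).getD m 0))
  let ys := prefixSums (moves.toList.map
    (fun m => (PySem.Dict.mk [('>', (0:Int)), ('<', 0), ('^', 1), ('v', -1)]).getD m 0))
  xs.zip ys

-- ===== PRECONDITION & SPEC =====
-- Pre_: every character is one of the four move characters; on any other character the Python A raises KeyError.
def Pre_houses (moves : String) : Prop :=
  (moves.toList.all (fun c => c == '>' || c == '<' || c == '^' || c == 'v')) = true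
instance (moves : String) : Decidable (Pre_houses moves) := by unfold Pre_houses; infer_instance
def pvWitness_houses : String := ">"

def Spec_houses (moves : String) (out : List (Int × Int)) : Prop := out = houses_alt moves
instance (moves : String) (out : List (Int × Int)) : Decidable (Spec_houses moves out) := by unfold Spec_houses; infer_instance

-- ===== CLAIM (what is proved, stated in full; the proofs are below) =====
def Claim_equal_houses : Prop := ∀ (moves : String), Dom_houses moves → Pre_houses moves → Spec_houses moves (houses moves)

-- ===== LEMMAS AND PROOFS =====

-- reference path list: positions reached from (px,py) by the given per-step deltas
def path (l : List (Int × Int)) (px py : Int) : List (Int × Int) :=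
  match l with
  | [] => []
  | d :: t => (px + d.1, py + d.2) :: path t (px + d.1) (py + d.2)

-- reference prefix sums from p
def psum (l : List Int) (p : Int) : List Int :=
  match l with
  | [] => []
  | d :: t => (p + d) :: psum t (p + d)

def dx (m : Char) : Int := (PySem.Dict.mk [('>', (1:Int)), ('<', -1), ('^', 0), ('v', 0)]).getD m 0
def dy (m : Char) : Int := (PySem.Dict.mk [('>', (0:Int)), ('<', 0), ('^', 1), ('v', -1)]).getD m 0

lemma getLast!_append_singleton (l : List Int) (p : Int) :
    (l ++ [p]).getLast! = p := by
  induction l with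
  | nil => rfl
  | cons a t ih => simp [List.getLast!]

-- A's fold appends exactly the reference path
lemma foldA_eq (l : List Char) (px py : Int) (acc : List (Int × Int)) :
    (l.foldl
      (fun st move =>
        let x := st.1 + dx move
        let y := st.2.1 + dy move
        (x, y, st.2.2 ++ [(x, y)]))
      (px, py, acc)).2.2
    = acc ++ path (l.map (fun m => (dx m, dy m))) px py := by
  induction l generalizing px py acc with
  | nil => simp [path]
  | cons m t ih => simp [path, ih, List.append_assoc]

-- B's prefix-sum fold appends exactly the reference prefix sums
lemma foldB_eq (l : List Int) (p : Int) (acc : List Int) (h : acc.getLast! = p) :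
    l.foldl (fun out d => out ++ [out.getLast! + d]) acc = acc ++ psum l p := by
  induction l generalizing p acc with
  | nil => simp [psum]
  | cons d t ih =>
    simp only [List.foldl_cons, psum, h]
    rw [ih (p + d) _ (getLast!_append_singleton acc _), List.append_assoc]
    rfl

-- zipping the two axes' prefix sums gives the path
lemma zip_psum (l : List Char) (px py : Int) :
    (psum (l.map dx) px).zip (psum (l.map dy) py)
      = path (l.map (fun m => (dx m, dy m))) px py := by
  induction l generalizing px py with
  | nil => rfl
  | cons m t ih => simp [psum, path, ih]

-- combined: A's core fold equals B's zipped prefix sums (dx/dy are definitionally A's two dict lookups)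
lemma main_eq (l : List Char) :
    (l.foldl
      (fun st move =>
        let x := st.1 + dx move
        let y := st.2.1 + dy move
        (x, y, st.2.2 ++ [(x, y)]))
      ((0 : Int), (0 : Int), [((0 : Int), (0 : Int))])).2.2
    = (prefixSums (l.map dx)).zip (prefixSums (l.map dy)) := by
  rw [foldA_eq]
  unfold prefixSums
  rw [foldB_eq _ 0 _ rfl, foldB_eq _ 0 _ rfl]
  show ((0 : Int), (0 : Int)) :: path _ 0 0 = ((0 : Int) :: psum _ 0).zip ((0 : Int) :: psum _ 0)
  rw [List.zip_cons_cons, zip_psum]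

-- ===== VERDICT (by name: the statement is the Claim_ definition above) =====
theorem houses_spec : Claim_equal_houses := by
  intro moves _ _
  unfold Spec_houses
  exact main_eq moves.toList
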